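-- pv_equiv track=rewrite | github.com/Armanyich/aaa-final-reviewed | src/webconf_audit/local/nginx/parser/parser.py | _skip_comment
-- ===== SOURCE A (Python) =====
-- def _advance_inline_position(index: int, column: int) -> tuple[int, int]:
--     return index + 1, column + 1
--
-- def _skip_comment(
--     text: str,
--     index: int,
--     column: int,
--     length: int,
-- ) -> tuple[int, int]:
--     while index < length and text[index] != "\n":
--         index, column = _advance_inline_position(index, column)
--     return index, column
-- ===== SOURCE B (Python) =====
-- def _skip_comment(
--     text: str,
--     index: int,
--     column: int,
--     length: int,
-- ) -> tuple[int, int]: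
--     if index >= length:
--         return index, column
--     nl = text.find("\n", index)
--     stop = length if nl == -1 or nl >= length else nl
--     return stop, column + (stop - index)
-- ===== Notes on version B (the rewrite author's own statement) =====
-- stated objective: alternative
-- what changed: Replaces the per-character while-loop that increments index and column one step at a time with a single str.find('\n', index) call: the stopping position is computed in one shot (capped at length) and the column is updated by the arithmetic delta stop - index.
-- outside the precondition, e.g. on _skip_comment('a\nb', -2, 0, 3): A returns (-2, 0), B returns (1, 3)
import Mathlib
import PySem

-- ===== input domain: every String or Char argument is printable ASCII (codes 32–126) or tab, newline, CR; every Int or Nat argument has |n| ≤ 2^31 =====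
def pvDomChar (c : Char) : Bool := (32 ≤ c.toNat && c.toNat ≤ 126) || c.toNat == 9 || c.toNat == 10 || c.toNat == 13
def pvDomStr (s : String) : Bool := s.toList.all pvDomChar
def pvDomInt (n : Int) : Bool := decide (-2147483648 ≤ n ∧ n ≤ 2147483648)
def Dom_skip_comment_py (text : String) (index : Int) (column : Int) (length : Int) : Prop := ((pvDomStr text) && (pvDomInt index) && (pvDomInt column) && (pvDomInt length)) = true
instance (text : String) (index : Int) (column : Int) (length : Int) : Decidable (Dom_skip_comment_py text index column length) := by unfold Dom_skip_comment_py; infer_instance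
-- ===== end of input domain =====

-- B replaces A's per-character while-loop by one find('\n', index) call and an arithmetic
-- column update (alternative decomposition, same exact result on Pre_).

-- ===== PORT A =====
def advance_inline_position_py (index : Int) (column : Int) : Int × Int :=
  (index + 1, column + 1)

-- the while-loop of _skip_comment; stops (outside Pre_) when text[index] would raise
def skip_comment_loop (text : String) (length : Int) (index : Int) (column : Int) : Int × Int :=
  if _h : index < length then
    match PySem.Str.pyGet? text index with
    | some c =>
      if c = '\n' then (index, column)
      else
        let p := advance_inline_position_py index column
        skip_comment_loop text length p.1 p.2
    | none => (index, column)
  else (index, column)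
termination_by (length - index).toNat
decreasing_by simp only [advance_inline_position_py]; omega

def skip_comment_py (text : String) (index : Int) (column : Int) (length : Int) : Int × Int :=
  skip_comment_loop text length index column

-- ===== PORT B =====
def skip_comment_py_alt (text : String) (index : Int) (column : Int) (length : Int) : Int × Int :=
  if length ≤ index then (index, column)
  else
    let nl := PySem.Str.findFrom text "\n" index none
    let stop := if nl = -1 ∨ length ≤ nl then length else nl
    (stop, column + (stop - index))

-- ===== PRECONDITION & SPEC =====
-- Pre_ restricts to the parser's natural domain: when the loop can run (index < length) the
-- index must be non-negative and length must not exceed len(text); outside it A either raises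
-- IndexError or reads characters through Python's negative-index wraparound, which B does not reproduce.
def Pre_skip_comment_py (text : String) (index : Int) (column : Int) (length : Int) : Prop :=
  length ≤ index ∨ (0 ≤ index ∧ length ≤ (text.toList.length : Int))
instance (text : String) (index : Int) (column : Int) (length : Int) : Decidable (Pre_skip_comment_py text index column length) := by unfold Pre_skip_comment_py; infer_instance

def pvWitness_skip_comment_py : String × Int × Int × Int := ("# hi\nx", 1, 1, 6)

def Spec_skip_comment_py (text : String) (index : Int) (column : Int) (length : Int) (out : Int × Int) : Prop := out = skip_comment_py_alt text index column length
instance (text : String) (index : Int) (column : Int) (length : Int) (out : Int × Int) : Decidable (Spec_skip_comment_py text index column length out) := by unfold Spec_skip_comment_py; infer_instance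

-- ===== CLAIM (what is proved, stated in full; the proofs are below) =====
def Claim_equal_skip_comment_py : Prop := ∀ (text : String) (index : Int) (column : Int) (length : Int), Dom_skip_comment_py text index column length → Pre_skip_comment_py text index column length → Spec_skip_comment_py text index column length (skip_comment_py text index column length)

-- ===== LEMMAS AND PROOFS =====

-- Chars.find on a singleton pattern: found at the head
theorem pv_find_cons_self (a : Char) (t : List Char) :
    PySem.Chars.find (a :: t) [a] = 0 := by
  have hinf : [a] <:+: (a :: t) := (List.singleton_infix_iff a (a :: t)).mpr (List.mem_cons_self)
  have h0 : 0 ≤ PySem.Chars.find (a :: t) [a] := (PySem.Chars.find_nonneg_iff _ _).mpr hinf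
  have hs := PySem.Chars.find_spec h0
  by_contra hne
  have hpos : 0 < (PySem.Chars.find (a :: t) [a]).toNat := by omega
  exact hs.2 0 hpos (by simp)

-- Chars.find on a singleton pattern skipping a non-matching head
theorem pv_find_cons_ne (a c : Char) (t : List Char) (h : c ≠ a) :
    PySem.Chars.find (c :: t) [a] =
      if PySem.Chars.find t [a] = -1 then -1 else PySem.Chars.find t [a] + 1 := by
  by_cases ht : PySem.Chars.find t [a] = -1
  · have hni : ¬ [a] <:+: t := (PySem.Chars.find_eq_neg_one_iff _ _).mp ht
    have : ¬ [a] <:+: (c :: t) := by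
      intro hic
      have := (List.singleton_infix_iff a (c :: t)).mp hic
      rcases List.mem_cons.mp this with h1 | h2
      · exact h h1.symm
      · exact hni ((List.singleton_infix_iff a t).mpr h2)
    simp [ht, (PySem.Chars.find_eq_neg_one_iff _ _).mpr this]
  · have h0 : 0 ≤ PySem.Chars.find t [a] := by
      have := PySem.Chars.neg_one_le_find t [a]; omega
    have hs := PySem.Chars.find_spec h0
    set f := PySem.Chars.find t [a] with hf
    -- find in c :: t equals f + 1
    have hinf : [a] <:+: (c :: t) := by
      apply (List.singleton_infix_iff a (c :: t)).mpr
      apply List.mem_cons_of_mem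
      exact (List.singleton_infix_iff a t).mp ((PySem.Chars.find_nonneg_iff _ _).mp h0)
    have h0' : 0 ≤ PySem.Chars.find (c :: t) [a] := (PySem.Chars.find_nonneg_iff _ _).mpr hinf
    have hs' := PySem.Chars.find_spec h0'
    set g := PySem.Chars.find (c :: t) [a] with hg
    have hle : g.toNat ≤ f.toNat + 1 := by
      by_contra hlt
      exact hs'.2 (f.toNat + 1) (by omega) (by simpa using hs.1)
    have hge : f.toNat + 1 ≤ g.toNat := by
      by_contra hlt
      rcases Nat.lt_or_ge g.toNat 1 with h1 | h1
      · have hzero : g.toNat = 0 := by omega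
        have := hs'.1
        rw [hzero] at this
        simp at this
        exact h this.symm
      · -- 1 ≤ g.toNat < f.toNat + 1, so g.toNat - 1 < f.toNat, contradicting minimality of f
        have hp := hs'.1
        rw [show g.toNat = (g.toNat - 1) + 1 by omega] at hp
        simp only [List.drop_succ_cons] at hp
        exact hs.2 (g.toNat - 1) (by omega) hp
    have : g.toNat = f.toNat + 1 := by omega
    rw [if_neg ht]
    omega

-- the first newline at ≥ k equals the first newline at ≥ k+1 when text[k] is not a newline
theorem pv_findFrom_step (L : List Char) (k : Nat) (hk : k < L.length) (h : L[k] ≠ '\n') :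
    PySem.Chars.findFrom L ['\n'] (k : Int) none = PySem.Chars.findFrom L ['\n'] ((k : Int) + 1) none := by
  have h1 := PySem.Chars.findFrom_natCast L ['\n'] k (by omega)
  have h2 := PySem.Chars.findFrom_natCast L ['\n'] (k + 1) (by omega)
  have hdrop : List.drop k L = L[k] :: List.drop (k + 1) L := List.drop_eq_getElem_cons hk
  rw [hdrop, pv_find_cons_ne '\n' L[k] _ h] at h1
  rw [show ((k : Int) + 1) = ((k + 1 : Nat) : Int) by push_cast; ring] at *
  rw [h1, h2]
  by_cases hn : PySem.Chars.find (List.drop (k + 1) L) ['\n'] = -1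
  · simp [hn]
  · have := PySem.Chars.neg_one_le_find (List.drop (k + 1) L) ['\n']
    simp only [hn, if_false]
    rw [if_neg (by omega)]
    push_cast; ring

-- when the found position is ≥ k+1 or -1, B at index k agrees with B at index k+1 (column shifted)
theorem pv_main (text : String) (length : Int) (hlen : length ≤ (text.toList.length : Int)) :
    ∀ (n : Nat) (index column : Int), 0 ≤ index → (length - index).toNat ≤ n →
      skip_comment_loop text length index column = skip_comment_py_alt text index column length := by
  intro n
  induction n with
  | zero =>
    intro index column h0 hn
    have hge : length ≤ index := by omega
    rw [skip_comment_loop, dif_neg (by omega)]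
    rw [skip_comment_py_alt, if_pos hge]
  | succ n ih =>
    intro index column h0 hn
    by_cases hlt : index < length
    · -- index.toNat is a valid position
      obtain ⟨k, hk⟩ : ∃ k : Nat, index = (k : Int) := ⟨index.toNat, by omega⟩
      subst hk
      have hkl : k < text.toList.length := by omega
      have hget : PySem.Str.pyGet? text (k : Int) = some text.toList[k] := by
        rw [PySem.Str.pyGet?_eq]
        simp [PySem.Chars.pyGet?]
      rw [skip_comment_loop, dif_pos hlt, hget]
      dsimp only
      by_cases hnl : text.toList[k] = '\n'
      · rw [if_pos hnl]
        -- B: findFrom lands exactly at k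
        have hf := PySem.Chars.findFrom_natCast text.toList ['\n'] k (by omega)
        have hdrop : List.drop k text.toList = text.toList[k] :: List.drop (k + 1) text.toList :=
          List.drop_eq_getElem_cons hkl
        rw [hdrop, hnl, pv_find_cons_self] at hf
        simp only [if_neg (by norm_num : ¬ (0 : Int) = -1), add_zero] at hf
        rw [skip_comment_py_alt, if_neg (by omega)]
        simp only [PySem.Str.findFrom_eq]
        have hsub : ("\n" : String).toList = ['\n'] := by decide
        rw [hsub, hf, if_neg (by omega)]
        rw [Prod.mk.injEq]
        constructor
        · rfl
        · ring
      · rw [if_neg hnl]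
        simp only [advance_inline_position_py]
        have hn' : (length - ((k : Int) + 1)).toNat ≤ n := by omega
        rw [ih ((k : Int) + 1) (column + 1) (by omega) hn']
        -- B at index k+1 (with column+1) equals B at index k (with column)
        have hstep := pv_findFrom_step text.toList k hkl hnl
        have hsub : ("\n" : String).toList = ['\n'] := by decide
        have hge : -1 ≤ PySem.Chars.findFrom text.toList ['\n'] ((k : Int) + 1) none ∧
            (PySem.Chars.findFrom text.toList ['\n'] ((k : Int) + 1) none = -1 ∨
             (k : Int) + 1 ≤ PySem.Chars.findFrom text.toList ['\n'] ((k : Int) + 1) none) := by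
          have hf2 := PySem.Chars.findFrom_natCast text.toList ['\n'] (k + 1) (by omega)
          rw [show ((k : Int) + 1) = ((k + 1 : Nat) : Int) by push_cast; ring, hf2]
          have hb := PySem.Chars.neg_one_le_find (List.drop (k + 1) text.toList) ['\n']
          by_cases hc : PySem.Chars.find (List.drop (k + 1) text.toList) ['\n'] = -1
          · rw [if_pos hc]; exact ⟨by omega, Or.inl rfl⟩
          · rw [if_neg hc]; exact ⟨by push_cast; omega, Or.inr (by push_cast; omega)⟩
        simp only [skip_comment_py_alt, PySem.Str.findFrom_eq, hsub]
        rw [hstep]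
        set nl := PySem.Chars.findFrom text.toList ['\n'] ((k : Int) + 1) none with hnldef
        rw [if_neg (show ¬ length ≤ (k : Int) by omega)]
        by_cases hend : length ≤ (k : Int) + 1
        · rw [if_pos hend]
          have hstop : (if nl = -1 ∨ length ≤ nl then length else nl) = length := by
            rcases hge.2 with h | h
            · rw [if_pos (Or.inl h)]
            · rw [if_pos (Or.inr (by omega))]
          rw [hstop, Prod.mk.injEq]
          exact ⟨by omega, by omega⟩
        · rw [if_neg hend]
          by_cases hfin : nl = -1 ∨ length ≤ nl
          · rw [if_pos hfin, Prod.mk.injEq]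
            exact ⟨rfl, by ring⟩
          · rw [if_neg hfin, Prod.mk.injEq]
            exact ⟨rfl, by ring⟩
    · rw [skip_comment_loop, dif_neg hlt]
      rw [skip_comment_py_alt, if_pos (by omega)]

-- ===== VERDICT (by name: the statement is the Claim_ definition above) =====
theorem skip_comment_py_spec : Claim_equal_skip_comment_py := by
  intro text index column length _hdom hpre
  unfold Spec_skip_comment_py skip_comment_py
  rcases hpre with hge | ⟨h0, hlen⟩
  · rw [skip_comment_loop, dif_neg (by omega)]
    rw [skip_comment_py_alt, if_pos hge]
  · exact pv_main text length hlen (length - index).toNat index column h0 le_rfl
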